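-- pv_equiv track=rewrite | github.com/jmomugtong/AccompanAIment | backend/src/music/voicing_generator.py | _build_triad_voicing
-- ===== SOURCE A (Python) =====
-- MIN_MIDI = 36  # C2
--
-- MAX_MIDI = 84  # C6
--
-- def _clamp_to_register(midi_note: int) -> int:
--     """Move a MIDI note into the valid register by shifting octaves."""
--     while midi_note < MIN_MIDI:
--         midi_note += 12
--     while midi_note > MAX_MIDI:
--         midi_note -= 12
--     return midi_note
--
-- def _build_triad_voicing(
--     pitch_classes: list[int], root_pc: int
-- ) -> list[int]:
--     """Build a simple triad voicing (3 notes).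
--
--     Places the root in octave 3 (MIDI ~48-59 range) and voices
--     the remaining notes close above it.
--     """
--     # Root in octave 3.
--     root_midi = root_pc + 48  # octave 3 base
--     if root_midi < MIN_MIDI:
--         root_midi += 12
--
--     notes = [root_midi]
--     for pc in pitch_classes:
--         if pc == root_pc:
--             continue
--         # Place above root, in closest position.
--         n = pc + 48
--         while n <= root_midi:
--             n += 12
--         # Keep within range.
--         n = _clamp_to_register(n)
--         notes.append(n)
--
--     return sorted(notes)[:3]
-- ===== SOURCE B (Python) =====
-- MIN_MIDI = 36  # C2
--
-- MAX_MIDI = 84  # C6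
--
-- def _build_triad_voicing(pitch_classes, root_pc):
--     """Closed-form octave arithmetic instead of the while loops."""
--     root_midi = root_pc + 48
--     if root_midi < MIN_MIDI:
--         root_midi += 12
--     notes = [root_midi]
--     for pc in pitch_classes:
--         if pc == root_pc:
--             continue
--         n = pc + 48
--         if n <= root_midi:
--             n += 12 * ((root_midi - n) // 12 + 1)
--         if n < MIN_MIDI:
--             n += 12 * ((MIN_MIDI - 1 - n) // 12 + 1)
--         elif n > MAX_MIDI:
--             n -= 12 * ((n - MAX_MIDI - 1) // 12 + 1)
--         notes.append(n)
--     return sorted(notes)[:3]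
-- ===== Notes on version B (the rewrite author's own statement) =====
-- stated objective: faster
-- what changed: Replaced every octave-shifting while loop (place-above-root and both register clamps) with closed-form floor-division formulas that compute the required number of 12-semitone jumps in one step.
import Mathlib
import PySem

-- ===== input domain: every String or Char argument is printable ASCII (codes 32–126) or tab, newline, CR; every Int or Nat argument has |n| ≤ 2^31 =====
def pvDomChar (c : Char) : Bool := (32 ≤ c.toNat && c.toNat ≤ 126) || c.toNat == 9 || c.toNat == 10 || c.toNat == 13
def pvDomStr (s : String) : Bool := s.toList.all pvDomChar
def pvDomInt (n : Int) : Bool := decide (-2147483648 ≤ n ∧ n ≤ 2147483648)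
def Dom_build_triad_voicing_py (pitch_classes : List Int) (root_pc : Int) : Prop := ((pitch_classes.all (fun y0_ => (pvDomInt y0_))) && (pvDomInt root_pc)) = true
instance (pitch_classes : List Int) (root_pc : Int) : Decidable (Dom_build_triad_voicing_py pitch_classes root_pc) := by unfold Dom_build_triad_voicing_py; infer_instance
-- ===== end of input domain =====

-- B replaces A's octave-stepping while loops with closed-form floor-division jumps (same return values).
-- ===== PORT A =====
-- while midi_note < MIN_MIDI: midi_note += 12
def pvClampUp (n : Int) : Int :=
  if n < 36 then pvClampUp (n + 12) else n
termination_by (36 - n).toNat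
decreasing_by omega

-- while midi_note > MAX_MIDI: midi_note -= 12
def pvClampDown (n : Int) : Int :=
  if n > 84 then pvClampDown (n - 12) else n
termination_by (n - 84).toNat
decreasing_by omega

def pvClampToRegister (n : Int) : Int := pvClampDown (pvClampUp n)

-- while n <= root_midi: n += 12
def pvPlaceAbove (root n : Int) : Int :=
  if n ≤ root then pvPlaceAbove root (n + 12) else n
termination_by (root + 1 - n).toNat
decreasing_by omega

def build_triad_voicing_py (pitch_classes : List Int) (root_pc : Int) : List Int :=
  let root_midi0 := root_pc + 48
  let root_midi := if root_midi0 < 36 then root_midi0 + 12 else root_midi0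
  let notes := pitch_classes.foldl
    (fun acc pc =>
      if pc == root_pc then acc
      else acc ++ [pvClampToRegister (pvPlaceAbove root_midi (pc + 48))])
    [root_midi]
  (PySem.List.sorted notes (fun x => x) false).take 3

-- ===== PORT B =====
def pvVoiceNote (root pc : Int) : Int :=
  let n := pc + 48
  let n := if n ≤ root then n + 12 * (PySem.Int.floordiv (root - n) 12 + 1) else n
  if n < 36 then n + 12 * (PySem.Int.floordiv (36 - 1 - n) 12 + 1)
  else if n > 84 then n - 12 * (PySem.Int.floordiv (n - 84 - 1) 12 + 1)
  else n

def build_triad_voicing_py_alt (pitch_classes : List Int) (root_pc : Int) : List Int :=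
  let root_midi0 := root_pc + 48
  let root_midi := if root_midi0 < 36 then root_midi0 + 12 else root_midi0
  let notes := pitch_classes.foldl
    (fun acc pc => if pc == root_pc then acc else acc ++ [pvVoiceNote root_midi pc])
    [root_midi]
  (PySem.List.sorted notes (fun x => x) false).take 3

-- ===== PRECONDITION & SPEC =====
def Spec_build_triad_voicing_py (pitch_classes : List Int) (root_pc : Int) (out : List Int) : Prop := out = build_triad_voicing_py_alt pitch_classes root_pc
instance (pitch_classes : List Int) (root_pc : Int) (out : List Int) : Decidable (Spec_build_triad_voicing_py pitch_classes root_pc out) := by unfold Spec_build_triad_voicing_py; infer_instance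

-- ===== CLAIM (what is proved, stated in full; the proofs are below) =====
def Claim_equal_build_triad_voicing_py : Prop := ∀ (pitch_classes : List Int) (root_pc : Int), Dom_build_triad_voicing_py pitch_classes root_pc → Spec_build_triad_voicing_py pitch_classes root_pc (build_triad_voicing_py pitch_classes root_pc)

-- ===== LEMMAS AND PROOFS =====
theorem pvPlaceAbove_closed (root n : Int) :
    pvPlaceAbove root n =
      if n ≤ root then n + 12 * (PySem.Int.floordiv (root - n) 12 + 1) else n := by
  have hd : ∀ a : Int, PySem.Int.floordiv a 12 = a / 12 :=
    fun a => PySem.Int.floordiv_eq_ediv_of_pos (by norm_num)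
  induction n using pvPlaceAbove.induct root with
  | case1 n h ih =>
    rw [pvPlaceAbove, if_pos h, ih]
    simp only [hd] at *
    split_ifs <;> omega
  | case2 n h =>
    rw [pvPlaceAbove, if_neg h, if_neg h]

theorem pvClampUp_closed (n : Int) :
    pvClampUp n = if n < 36 then n + 12 * (PySem.Int.floordiv (36 - 1 - n) 12 + 1) else n := by
  have hd : ∀ a : Int, PySem.Int.floordiv a 12 = a / 12 :=
    fun a => PySem.Int.floordiv_eq_ediv_of_pos (by norm_num)
  induction n using pvClampUp.induct with
  | case1 n h ih =>
    rw [pvClampUp, if_pos h, ih]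
    simp only [hd] at *
    split_ifs <;> omega
  | case2 n h =>
    rw [pvClampUp, if_neg h, if_neg h]

theorem pvClampDown_closed (n : Int) :
    pvClampDown n = if n > 84 then n - 12 * (PySem.Int.floordiv (n - 84 - 1) 12 + 1) else n := by
  have hd : ∀ a : Int, PySem.Int.floordiv a 12 = a / 12 :=
    fun a => PySem.Int.floordiv_eq_ediv_of_pos (by norm_num)
  induction n using pvClampDown.induct with
  | case1 n h ih =>
    rw [pvClampDown, if_pos h, ih]
    simp only [hd] at *
    split_ifs <;> omega
  | case2 n h =>
    rw [pvClampDown, if_neg h, if_neg h]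

theorem pvVoiceNote_eq (root pc : Int) :
    pvClampToRegister (pvPlaceAbove root (pc + 48)) = pvVoiceNote root pc := by
  have hd : ∀ a : Int, PySem.Int.floordiv a 12 = a / 12 :=
    fun a => PySem.Int.floordiv_eq_ediv_of_pos (by norm_num)
  simp only [pvClampToRegister, pvVoiceNote, pvPlaceAbove_closed, pvClampUp_closed,
    pvClampDown_closed, hd]
  split_ifs <;> omega

-- ===== VERDICT (by name: the statement is the Claim_ definition above) =====
theorem build_triad_voicing_py_spec : Claim_equal_build_triad_voicing_py := by
  intro pitch_classes root_pc _
  unfold Spec_build_triad_voicing_py build_triad_voicing_py build_triad_voicing_py_alt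
  simp only [pvVoiceNote_eq]
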